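-- pv_equiv track=rewrite | github.com/stirfrypapi/coding_challenges | coding_challenges/uber_coding_challenge.py | solution
-- ===== SOURCE A (Python) =====
-- def prefixIsInString(prefix, word):
--     if len(prefix) > len(word):
--         return False
--     for i in range(0, len(prefix)):
--         if prefix[i] == word[i]:
--             continue
--         else:
--             return False
--     return True
--
-- def solution(strings, sources):
--     ans = []
--     for source in sources: # source = "onetwo"
--         source_index = 0 # 0
--         for i in range(0, len(strings)): # i=2
--             if prefixIsInString(strings[i], source[source_index:]): # ("b", "b")
--                 source_index += len(strings[i]) # 3
--             else:
--                 ans.append(False)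
--                 break
--             if source[source_index:] == "":
--                 ans.append(True)
--                 break
--             elif i == len(strings)-1:
--                 ans.append(False)
--                 break
--     return ans
-- ===== SOURCE B (Python) =====
-- def solution(strings, sources):
--     full = "".join(strings)
--     lens = set()
--     t = 0
--     for s in strings:
--         t += len(s)
--         lens.add(t)
--     return [len(src) in lens and src == full[:len(src)] for src in sources]
-- ===== Notes on version B (the rewrite author's own statement) =====
-- stated objective: faster
-- what changed: B joins strings once into one string, precomputes the set of cumulative lengths in one pass, and answers each source by a length-set lookup plus one prefix comparison against the joined string, replacing A's per-source prefix-walk over the whole strings list.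
-- intended difference: When strings is empty and sources is non-empty, A's inner loop never runs so A returns [] (fewer answers than sources); B returns [False] per source, which is the intended one-answer-per-source value. — e.g. on solution([], ["a"]): A returns [], B returns [false]
import Mathlib
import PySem

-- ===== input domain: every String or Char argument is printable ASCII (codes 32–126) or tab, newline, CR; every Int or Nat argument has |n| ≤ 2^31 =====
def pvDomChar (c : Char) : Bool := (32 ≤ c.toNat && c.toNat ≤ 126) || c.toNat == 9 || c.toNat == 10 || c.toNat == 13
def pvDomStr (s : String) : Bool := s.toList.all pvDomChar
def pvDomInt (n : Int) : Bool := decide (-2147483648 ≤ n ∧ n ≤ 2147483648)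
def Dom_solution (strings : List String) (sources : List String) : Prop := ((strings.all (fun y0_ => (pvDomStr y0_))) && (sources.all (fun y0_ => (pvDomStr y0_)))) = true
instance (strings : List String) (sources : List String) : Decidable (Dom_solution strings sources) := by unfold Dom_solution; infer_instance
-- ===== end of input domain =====

-- B builds the set of cumulative concatenations of `strings` once and answers each source by one membership test.
-- Return-value equivalence only; neither program mutates its arguments.

-- ===== PORT A =====
-- for i in range(0, len(prefix)): if prefix[i] == word[i]: continue else: return False
def prefLoop (p w : List Char) : List Int → Bool
  | [] => true
  | i :: rest =>
    if PySem.List.pyGet? p i = PySem.List.pyGet? w i then prefLoop p w rest else false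

def prefixIsInString (pre word : List Char) : Bool :=
  if pre.length > word.length then false
  else prefLoop pre word (PySem.List.pyRange 0 pre.length 1)

-- the inner 'for i in range(0, len(strings))' loop of A, over the remaining strings;
-- `some b` = 'ans.append(b); break', `none` = the loop ran out (only when strings == [])
def solInner (source : List Char) : List String → Int → Option Bool
  | [], _ => none
  | s :: rest, si =>
    if prefixIsInString s.toList (PySem.List.slice source (some si) none) then
      -- source_index += len(strings[i])
      if PySem.List.slice source (some (si + (s.toList.length : Int))) none = ([] : List Char) then
        some true
      else if rest.isEmpty then some false   -- i == len(strings)-1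
      else solInner source rest (si + (s.toList.length : Int))
    else some false

def solution (strings : List String) (sources : List String) : List Bool :=
  sources.foldl (fun ans source =>
    match solInner source.toList strings 0 with
    | some b => ans ++ [b]
    | none => ans) []

-- ===== PORT B =====
def solution_alt (strings : List String) (sources : List String) : List Bool :=
  let full := PySem.Chars.join [] (strings.map String.toList)   -- full = "".join(strings)
  let p := strings.foldl (fun (q : PySem.Set Int × Int) s =>
    (PySem.Set.add q.1 (q.2 + (s.toList.length : Int)), q.2 + (s.toList.length : Int)))
    (PySem.Set.empty, 0)                                        -- t += len(s); lens.add(t)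
  sources.map (fun src =>
    PySem.Set.contains p.1 (src.toList.length : Int) &&
      decide (src.toList = PySem.List.slice full none (some (src.toList.length : Int))))

-- ===== PRECONDITION & SPEC =====
-- When strings is empty and sources is non-empty, A's inner loop never runs so A returns []
-- (fewer answers than sources); B returns [False] per source, the intended one-answer-per-source value.
def D_solution (strings : List String) (sources : List String) : Prop :=
  strings = [] ∧ sources ≠ []
instance (strings : List String) (sources : List String) : Decidable (D_solution strings sources) := by
  unfold D_solution; infer_instance

def Spec_solution (strings : List String) (sources : List String) (out : List Bool) : Prop :=
  ¬ D_solution strings sources → out = solution_alt strings sources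
instance (strings : List String) (sources : List String) (out : List Bool) : Decidable (Spec_solution strings sources out) := by
  unfold Spec_solution; infer_instance

def pvDiffWitness_solution : List String × List String := ([], ["a"])
def pvDiffWitnessOut_solution : (List Bool) × (List Bool) := ([], [false])

-- ===== CLAIM (what is proved, stated in full; the proofs are below) =====
def Claim_unchanged_solution : Prop := ∀ (strings : List String) (sources : List String), Dom_solution strings sources → Spec_solution strings sources (solution strings sources)
def Claim_changed_solution : Prop := Dom_solution (pvDiffWitness_solution.1) (pvDiffWitness_solution.2) ∧ D_solution (pvDiffWitness_solution.1) (pvDiffWitness_solution.2) ∧ solution (pvDiffWitness_solution.1) (pvDiffWitness_solution.2) = pvDiffWitnessOut_solution.1 ∧ solution_alt (pvDiffWitness_solution.1) (pvDiffWitness_solution.2) = pvDiffWitnessOut_solution.2 ∧ pvDiffWitnessOut_solution.1 ≠ pvDiffWitnessOut_solution.2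
def Claim_exact_solution : Prop := ∀ (strings : List String) (sources : List String), Dom_solution strings sources → D_solution strings sources → solution strings sources ≠ solution_alt strings sources

-- ===== LEMMAS AND PROOFS =====

-- cumulative concatenations acc++s0, acc++s0++s1, …
def cums (acc : List Char) : List String → List (List Char)
  | [] => []
  | s :: rest => (acc ++ s.toList) :: cums (acc ++ s.toList) rest

-- A's True-set characterized recursively on the remainder
def hit (r : List Char) : List String → Bool
  | [] => false
  | s :: rest =>
    if s.toList.IsPrefix r then
      (if r.drop s.toList.length = [] then true else hit (r.drop s.toList.length) rest)
    else false

theorem pyGet?_nonneg_lt {α : Type} (p : List α) (i : Int) (h0 : 0 ≤ i) (h1 : i.toNat < p.length) :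
    PySem.List.pyGet? p i = some p[i.toNat] := by
  obtain ⟨n, rfl⟩ := Int.eq_ofNat_of_zero_le h0
  simp only [Int.toNat_natCast] at h1 ⊢
  rw [PySem.List.pyGet?_natCast]
  exact List.getElem?_eq_getElem h1

theorem prefLoop_eq_all (p w : List Char) (is : List Int) :
    prefLoop p w is = is.all (fun i => PySem.List.pyGet? p i == PySem.List.pyGet? w i) := by
  induction is with
  | nil => rfl
  | cons i rest ih =>
    simp only [prefLoop, List.all_cons]
    split_ifs with h
    · simp [h, ih]
    · simp [beq_eq_false_iff_ne.mpr h]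

theorem prefixIsInString_eq (p w : List Char) :
    prefixIsInString p w = true ↔ p <+: w := by
  unfold prefixIsInString
  rw [prefLoop_eq_all]
  split_ifs with h
  · simp only [false_iff]
    intro hp
    exact h.not_ge hp.length_le
  · rw [not_lt] at h
    rw [List.all_eq_true, List.prefix_iff_getElem?]
    constructor
    · intro hall i hi
      have hmem := hall (i : Int) (by rw [PySem.List.mem_pyRange_one]; omega)
      rw [beq_iff_eq, pyGet?_nonneg_lt p (i : Int) (by omega) (by simpa using hi),
        pyGet?_nonneg_lt w (i : Int) (by omega) (by simp; omega)] at hmem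
      simp only [Int.toNat_natCast] at hmem
      rw [List.getElem?_eq_getElem (show i < w.length by omega)]
      exact congrArg some (Option.some.inj hmem).symm
    · intro hp i hi
      rw [PySem.List.mem_pyRange_one] at hi
      have h1 : i.toNat < p.length := by omega
      rw [beq_iff_eq, pyGet?_nonneg_lt p i hi.1 h1, pyGet?_nonneg_lt w i hi.1 (by omega)]
      have := hp i.toNat h1
      rw [List.getElem?_eq_getElem (by omega)] at this
      exact congrArg some (Option.some.inj this).symm

theorem solInner_eq_hit (l : List String) (hl : l ≠ []) :
    ∀ (cs : List Char) (si : Int), 0 ≤ si →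
      solInner cs l si = some (hit (cs.drop si.toNat) l) := by
  induction l with
  | nil => exact absurd rfl hl
  | cons s rest ih =>
    intro cs si hsi
    have hslice : PySem.List.slice cs (some si) none = cs.drop si.toNat :=
      PySem.List.slice_from cs hsi
    have hslice' : PySem.List.slice cs (some (si + (s.toList.length : Int))) none
        = (cs.drop si.toNat).drop s.toList.length := by
      rw [PySem.List.slice_from cs (by omega), List.drop_drop]
      congr 1
      omega
    rw [solInner, hslice, hslice', hit]
    by_cases hp : s.toList <+: cs.drop si.toNat
    · rw [if_pos ((prefixIsInString_eq _ _).mpr hp), if_pos hp]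
      by_cases hr : (cs.drop si.toNat).drop s.toList.length = []
      · rw [if_pos hr, if_pos hr]
      · rw [if_neg hr, if_neg hr]
        cases rest with
        | nil => rw [hit]; rfl
        | cons t rs =>
          rw [show (t :: rs).isEmpty = false from rfl, if_neg (by simp),
            ih (by simp) cs (si + (s.toList.length : Int)) (by omega), List.drop_drop,
            show (si + (s.toList.length : Int)).toNat = si.toNat + s.toList.length by omega]
    · rw [if_neg (by simpa [prefixIsInString_eq]), if_neg hp]

theorem cums_shift (acc : List Char) (l : List String) :
    cums acc l = (cums [] l).map (acc ++ ·) := by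
  induction l generalizing acc with
  | nil => rfl
  | cons s rest ih =>
    simp only [cums, List.map_cons, List.nil_append, List.cons.injEq]
    refine ⟨trivial, ?_⟩
    rw [ih (acc ++ s.toList), ih s.toList, List.map_map]
    simp [Function.comp_def]

theorem hit_iff_mem_cums (l : List String) :
    ∀ r : List Char, hit r l = true ↔ r ∈ cums [] l := by
  induction l with
  | nil => intro r; simp [hit, cums]
  | cons s rest ih =>
    intro r
    simp only [hit, cums, List.nil_append, List.mem_cons]
    by_cases hp : s.toList <+: r
    · rw [if_pos hp]
      obtain ⟨r', rfl⟩ := hp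
      have hd : (s.toList ++ r').drop s.toList.length = r' := by simp
      rw [hd]
      by_cases hr : r' = []
      · subst hr; simp
      · rw [if_neg hr, ih r', cums_shift s.toList rest]
        simp only [List.mem_map]
        constructor
        · intro h; exact Or.inr ⟨r', h, rfl⟩
        · rintro (h | ⟨t, ht, he⟩)
          · have h2 : s.toList ++ r' = s.toList ++ [] := by rw [List.append_nil]; exact h
            exact absurd (List.append_cancel_left h2) hr
          · obtain rfl := List.append_cancel_left he.symm
            exact ht
    · rw [if_neg hp]
      simp only [Bool.false_eq_true, false_iff]
      rintro (rfl | h)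
      · exact hp List.prefix_rfl
      · rw [cums_shift s.toList rest] at h
        obtain ⟨t, _, rfl⟩ := List.mem_map.mp h
        exact hp ⟨t, rfl⟩

-- cumulative lengths t+|s0|, t+|s0|+|s1|, …
def cumLens (t : Nat) : List String → List Nat
  | [] => []
  | s :: r => (t + s.toList.length) :: cumLens (t + s.toList.length) r

theorem join_nil_eq_flatten (parts : List (List Char)) :
    PySem.Chars.join [] parts = parts.flatten := by
  induction parts with
  | nil => simp [PySem.Chars.join_nil]
  | cons a r ih =>
    cases r with
    | nil => simp [PySem.Chars.join_singleton]
    | cons b t =>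
      rw [PySem.Chars.join_cons_cons, List.flatten_cons, ih]
      simp

theorem foldLen_mem (l : List String) :
    ∀ (S : PySem.Set Int) (t : Nat) (x : Int),
      (x ∈ (l.foldl (fun (q : PySem.Set Int × Int) s =>
        (PySem.Set.add q.1 (q.2 + (s.toList.length : Int)), q.2 + (s.toList.length : Int)))
        (S, (t : Int))).1)
      ↔ x ∈ S ∨ x ∈ (cumLens t l).map Int.ofNat := by
  induction l with
  | nil => intro S t x; simp [cumLens]
  | cons s r ih =>
    intro S t x
    rw [List.foldl_cons,
      show (t : Int) + (s.toList.length : Int) = ((t + s.toList.length : Nat) : Int) by push_cast; ring,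
      ih, PySem.Set.mem_add, cumLens]
    simp only [List.map_cons, List.mem_cons, Int.ofNat_eq_natCast]
    tauto

theorem cumLens_le (l : List String) :
    ∀ (t : Nat), ∀ n ∈ cumLens t l, n ≤ t + ((l.map String.toList).flatten).length := by
  induction l with
  | nil => intro t n hn; simp [cumLens] at hn
  | cons s r ih =>
    intro t n hn
    rw [cumLens, List.mem_cons] at hn
    rcases hn with rfl | hn
    · simp only [List.map_cons, List.flatten_cons, List.length_append]
      omega
    · have := ih (t + s.toList.length) n hn
      simp only [List.map_cons, List.flatten_cons, List.length_append]
      omega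

theorem cums_take (l : List String) :
    ∀ (acc : List Char),
      cums acc l = (cumLens acc.length l).map
        (fun n => (acc ++ (l.map String.toList).flatten).take n) := by
  induction l with
  | nil => intro acc; rfl
  | cons s r ih =>
    intro acc
    simp only [cums, cumLens, List.map_cons, List.flatten_cons, List.cons.injEq]
    constructor
    · rw [← List.append_assoc]
      exact (List.take_left' (by simp)).symm
    · rw [ih (acc ++ s.toList)]
      simp [List.append_assoc]

theorem solution_alt_eq_map (strings sources : List String) :
    solution_alt strings sources = sources.map (fun src => hit src.toList strings) := by
  unfold solution_alt
  apply List.map_congr_left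
  intro src _
  rw [Bool.eq_iff_iff, Bool.and_eq_true, PySem.Set.contains_iff, decide_eq_true_eq,
    hit_iff_mem_cums, cums_take strings [], join_nil_eq_flatten,
    show (0 : Int) = ((0 : Nat) : Int) by simp, foldLen_mem strings PySem.Set.empty 0,
    PySem.List.slice_to_natCast]
  simp only [PySem.Set.empty, List.not_mem_nil, false_or, List.length_nil, List.nil_append,
    List.mem_map, Int.ofNat_eq_natCast]
  constructor
  · rintro ⟨⟨n, hn, hc⟩, heq⟩
    have hne : n = src.toList.length := by exact_mod_cast hc
    subst hne
    exact ⟨_, hn, heq.symm⟩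
  · rintro ⟨n, hn, heq⟩
    have hle := cumLens_le strings 0 n hn
    have hlen : src.toList.length = n := by rw [← heq, List.length_take]; omega
    refine ⟨⟨n, hn, by rw [hlen]⟩, ?_⟩
    rw [hlen]
    exact heq.symm

theorem solution_empty (sources : List String) : solution [] sources = [] := by
  unfold solution
  have hb : ∀ (ans : List Bool), ∀ source ∈ sources,
      (match solInner source.toList ([] : List String) 0 with
       | some b => ans ++ [b]
       | none => ans) = ans := by intro ans source _; rfl
  rw [PySem.List.foldl_congr_mem sources _ (fun ans _ => ans) ([] : List Bool) hb]
  exact PySem.List.foldl_ignore sources ([] : List Bool)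

-- ===== VERDICT (by name: the statement is the Claim_ definition above) =====
theorem solution_spec : Claim_unchanged_solution := by
  intro strings sources _ hD
  unfold D_solution at hD
  rw [solution_alt_eq_map]
  cases strings with
  | nil =>
    have hsrc : sources = [] := not_not.mp (fun hs => hD ⟨rfl, hs⟩)
    subst hsrc
    rfl
  | cons s rest =>
    unfold solution
    have hbody : ∀ (ans : List Bool), ∀ source ∈ sources,
        (match solInner source.toList (s :: rest) 0 with
         | some b => ans ++ [b]
         | none => ans) = ans ++ [hit source.toList (s :: rest)] := by
      intro ans source _
      rw [solInner_eq_hit (s :: rest) (by simp) source.toList 0 le_rfl]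
      simp
    rw [PySem.List.foldl_congr_mem sources _
      (fun ans src => ans ++ [hit src.toList (s :: rest)]) ([] : List Bool) hbody,
      PySem.List.foldl_append_singleton_eq_map]
    simp

theorem solution_changed : Claim_changed_solution := by
  unfold Claim_changed_solution; decide

theorem solution_tight : Claim_exact_solution := by
  intro strings sources _ hD
  obtain ⟨rfl, hs⟩ := hD
  rw [solution_empty, solution_alt_eq_map]
  intro h
  exact hs (by simpa using h.symm)
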